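-- pv_equiv track=rewrite | github.com/pypi-data/pypi-mirror-402 | packages/napari-piscis/napari_piscis-0.1.22-py3-none-any.whl/napari_piscis/_widget.py | infer_img_axes
-- ===== SOURCE A (Python) =====
-- def infer_img_axes(shape: tuple) -> str:
--     """Infers axes (e.g. 'yx', 'zyx') from shape."""
--     if len(shape) == 2:
--         return 'yx'
--     elif len(shape) == 3:
--         if shape[-1] in (3, 4):
--             return 'yxc'
--         min_dim_idx = shape.index(min(shape))
--         low_dim_shape = list(shape)
--         low_dim_shape.pop(min_dim_idx)
--         low_dim_axes = infer_img_axes(tuple(low_dim_shape))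
--         return low_dim_axes[:min_dim_idx] + 'z' + low_dim_axes[min_dim_idx:]
--     else:
--         raise ValueError(f"Image shape {shape} is not supported.")
-- ===== SOURCE B (Python) =====
-- def infer_img_axes(shape: tuple) -> str:
--     """Infers axes (e.g. 'yx', 'zyx') from shape."""
--     n = len(shape)
--     if n == 2:
--         return 'yx'
--     if n != 3:
--         raise ValueError(f"Image shape {shape} is not supported.")
--     y, x, c = shape
--     if c in (3, 4):
--         return 'yxc'
--     if y <= x and y <= c:
--         return 'zyx'
--     if x <= c:
--         return 'yzx'
--     return 'yxz'
-- ===== Notes on version B (the rewrite author's own statement) =====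
-- stated objective: simpler
-- what changed: B replaces A's min/index/list-pop/recursion/string-splice machinery by unpacking the three dimensions and selecting one of three literal answers ('zyx','yzx','yxz') with two comparisons that encode first-minimum tie-breaking.
import Mathlib
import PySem

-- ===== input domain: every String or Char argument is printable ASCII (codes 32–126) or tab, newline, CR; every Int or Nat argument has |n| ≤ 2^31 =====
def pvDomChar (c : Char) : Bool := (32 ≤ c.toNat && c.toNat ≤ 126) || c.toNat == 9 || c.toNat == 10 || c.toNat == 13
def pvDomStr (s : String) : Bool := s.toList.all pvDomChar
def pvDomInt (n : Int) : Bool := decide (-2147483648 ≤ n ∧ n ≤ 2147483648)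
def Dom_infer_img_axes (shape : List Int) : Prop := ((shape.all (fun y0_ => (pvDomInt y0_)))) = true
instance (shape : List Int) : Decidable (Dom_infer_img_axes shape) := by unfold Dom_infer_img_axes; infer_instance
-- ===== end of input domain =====

-- B drops A's min/index/pop/recursion/splice in favour of a three-way comparison table; equivalence proved on Pre_ (shapes of length 2 or 3, where A returns).

-- ===== PORT A =====
-- literal port of A: copy the list, pop the min-dim index, recurse, splice 'z' into the recursive result
def infer_img_axes (shape : List Int) : String :=
  if shape.length = 2 then "yx"
  else if shape.length = 3 then
    if PySem.List.pyGet? shape (-1) = some 3 ∨ PySem.List.pyGet? shape (-1) = some 4 then "yxc"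
    else
      let min_dim_idx : Nat :=
        (PySem.List.index? shape ((PySem.List.min? shape (fun x => x)).getD 0)).getD 0
      match _hp : PySem.List.pop? shape (min_dim_idx : Int) with
      | some (_, low_dim_shape) =>
          let low_dim_axes := infer_img_axes low_dim_shape
          PySem.Str.slice low_dim_axes none (some (min_dim_idx : Int)) ++ "z" ++
            PySem.Str.slice low_dim_axes (some (min_dim_idx : Int)) none
      | none => ""          -- unreachable: the index of the min is always in range
  else ""                    -- Python raises ValueError here (excluded by Pre_)
termination_by shape.length
decreasing_by
  have h := PySem.List.length_of_pop?_eq_some shape _hp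
  simp at h
  omega

-- ===== PORT B =====
-- port of B: unpack the three dims; two comparisons pick one of three literal answers
def infer_img_axes_alt (shape : List Int) : String :=
  match shape with
  | [_, _] => "yx"
  | [y, x, c] =>
      if c = 3 ∨ c = 4 then "yxc"
      else if y ≤ x ∧ y ≤ c then "zyx"
      else if x ≤ c then "yzx"
      else "yxz"
  | _ => ""                  -- Python raises ValueError here (excluded by Pre_)

-- ===== PRECONDITION & SPEC =====
-- A raises ValueError on any shape whose length is not 2 or 3; exactly those are excluded.
def Pre_infer_img_axes (shape : List Int) : Prop := shape.length = 2 ∨ shape.length = 3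
instance (shape : List Int) : Decidable (Pre_infer_img_axes shape) := by
  unfold Pre_infer_img_axes; infer_instance
def pvWitness_infer_img_axes : List Int := ([5, 7, 2] : List Int)
def Spec_infer_img_axes (shape : List Int) (out : String) : Prop := out = infer_img_axes_alt shape
instance (shape : List Int) (out : String) : Decidable (Spec_infer_img_axes shape out) := by unfold Spec_infer_img_axes; infer_instance

-- ===== CLAIM (what is proved, stated in full; the proofs are below) =====
def Claim_equal_infer_img_axes : Prop := ∀ (shape : List Int), Dom_infer_img_axes shape → Pre_infer_img_axes shape → Spec_infer_img_axes shape (infer_img_axes shape)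

-- ===== LEMMAS AND PROOFS =====

-- on the 2-element list left after the pop, A's recursive call returns "yx"
lemma infer_A_two (u v : Int) : infer_img_axes [u, v] = "yx" := by
  rw [infer_img_axes.eq_def]; simp

-- evaluate A on a 3-element non-colour shape as the same comparison table B uses
lemma infer_A_three (y x c : Int) (hc : ¬ (c = 3 ∨ c = 4)) :
    infer_img_axes [y, x, c] =
      if y ≤ x ∧ y ≤ c then "zyx" else if x ≤ c then "yzx" else "yxz" := by
  rw [infer_img_axes.eq_def]
  have hg : PySem.List.pyGet? ([y, x, c] : List Int) (-1) = some c := by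
    simp [PySem.List.pyGet?, PySem.List.pyIdx?]
  rw [if_neg (by simp : ¬ ([y, x, c] : List Int).length = 2),
      if_pos (by simp : ([y, x, c] : List Int).length = 3),
      if_neg (by rw [hg]; simpa using hc)]
  by_cases hyx : y ≤ x
  · by_cases hyc : y ≤ c
    · -- minimum is y at index 0
      have hm : PySem.List.min? ([y, x, c] : List Int) (fun v => v) = some y := by
        rw [PySem.List.min?_id_cons]; simp [List.foldl]; omega
      have hi : PySem.List.index? ([y, x, c] : List Int) y = some 0 :=
        PySem.List.index?_cons_self ..
      simp only [hm, Option.getD_some, hi]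
      rw [if_pos ⟨hyx, hyc⟩]
      split
      · rename_i v low hp
        simp only [hm, Option.getD_some, hi] at hp
        rw [PySem.List.pop?_natCast _ 0 (by simp)] at hp
        simp only [Option.some.injEq, Prod.mk.injEq] at hp
        rw [show ([y, x, c] : List Int).eraseIdx 0 = [x, c] from rfl] at hp
        rw [← hp.2, infer_A_two]
        decide
      · rename_i hp
        simp only [hm, Option.getD_some, hi] at hp
        rw [PySem.List.pop?_natCast _ 0 (by simp)] at hp
        exact absurd hp (by simp)
    · -- c < y ≤ x: minimum is c at index 2
      have hm : PySem.List.min? ([y, x, c] : List Int) (fun v => v) = some c := by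
        rw [PySem.List.min?_id_cons]; simp [List.foldl]; omega
      have hi : PySem.List.index? ([y, x, c] : List Int) c = some 2 := by
        rw [PySem.List.index?_cons_of_ne _ (show y ≠ c by omega),
            PySem.List.index?_cons_of_ne _ (show x ≠ c by omega),
            PySem.List.index?_cons_self]
        rfl
      have hneg : ¬ (y ≤ x ∧ y ≤ c) := by omega
      have hxc : ¬ x ≤ c := by omega
      simp only [hm, Option.getD_some, hi]
      rw [if_neg hneg, if_neg hxc]
      split
      · rename_i v low hp
        simp only [hm, Option.getD_some, hi] at hp
        rw [PySem.List.pop?_natCast _ 2 (by simp)] at hp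
        simp only [Option.some.injEq, Prod.mk.injEq] at hp
        rw [show ([y, x, c] : List Int).eraseIdx 2 = [y, x] from rfl] at hp
        rw [← hp.2, infer_A_two]
        decide
      · rename_i hp
        simp only [hm, Option.getD_some, hi] at hp
        rw [PySem.List.pop?_natCast _ 2 (by simp)] at hp
        exact absurd hp (by simp)
  · by_cases hxc : x ≤ c
    · -- x < y, x ≤ c: minimum is x at index 1
      have hm : PySem.List.min? ([y, x, c] : List Int) (fun v => v) = some x := by
        rw [PySem.List.min?_id_cons]; simp [List.foldl]; omega
      have hi : PySem.List.index? ([y, x, c] : List Int) x = some 1 := by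
        rw [PySem.List.index?_cons_of_ne _ (show y ≠ x by omega),
            PySem.List.index?_cons_self]
        rfl
      have hneg : ¬ (y ≤ x ∧ y ≤ c) := by omega
      simp only [hm, Option.getD_some, hi]
      rw [if_neg hneg, if_pos hxc]
      split
      · rename_i v low hp
        simp only [hm, Option.getD_some, hi] at hp
        rw [PySem.List.pop?_natCast _ 1 (by simp)] at hp
        simp only [Option.some.injEq, Prod.mk.injEq] at hp
        rw [show ([y, x, c] : List Int).eraseIdx 1 = [y, c] from rfl] at hp
        rw [← hp.2, infer_A_two]
        decide
      · rename_i hp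
        simp only [hm, Option.getD_some, hi] at hp
        rw [PySem.List.pop?_natCast _ 1 (by simp)] at hp
        exact absurd hp (by simp)
    · -- c < x < y: minimum is c at index 2
      have hm : PySem.List.min? ([y, x, c] : List Int) (fun v => v) = some c := by
        rw [PySem.List.min?_id_cons]; simp [List.foldl]; omega
      have hi : PySem.List.index? ([y, x, c] : List Int) c = some 2 := by
        rw [PySem.List.index?_cons_of_ne _ (show y ≠ c by omega),
            PySem.List.index?_cons_of_ne _ (show x ≠ c by omega),
            PySem.List.index?_cons_self]
        rfl
      have hneg : ¬ (y ≤ x ∧ y ≤ c) := by omega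
      simp only [hm, Option.getD_some, hi]
      rw [if_neg hneg, if_neg hxc]
      split
      · rename_i v low hp
        simp only [hm, Option.getD_some, hi] at hp
        rw [PySem.List.pop?_natCast _ 2 (by simp)] at hp
        simp only [Option.some.injEq, Prod.mk.injEq] at hp
        rw [show ([y, x, c] : List Int).eraseIdx 2 = [y, x] from rfl] at hp
        rw [← hp.2, infer_A_two]
        decide
      · rename_i hp
        simp only [hm, Option.getD_some, hi] at hp
        rw [PySem.List.pop?_natCast _ 2 (by simp)] at hp
        exact absurd hp (by simp)

-- ===== VERDICT (by name: the statement is the Claim_ definition above) =====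
theorem infer_img_axes_spec : Claim_equal_infer_img_axes := by
  intro shape _dom hpre
  unfold Spec_infer_img_axes
  rcases hpre with h2 | h3
  · match shape, h2 with
    | [u, v], _ => rw [infer_A_two]; rfl
  · match shape, h3 with
    | [y, x, c], _ =>
      by_cases hc : c = 3 ∨ c = 4
      · rw [infer_img_axes.eq_def]
        simp [infer_img_axes_alt, PySem.List.pyGet?, PySem.List.pyIdx?, hc]
      · rw [infer_A_three y x c hc]
        simp only [infer_img_axes_alt]
        rw [if_neg hc]
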